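-- pv_equiv track=rewrite | github.com/jwheat-code/CTAyyy | scripts/classify_rules.py | detect_persona
-- ===== SOURCE A (Python) =====
-- PERSONA_KEYWORDS = {
--     "small_business_owner": [
--         "small business", "startup", "smb", "sme", "entrepreneur", "founder",
--         "growing business", "small team",
--     ],
--     "sales_leader": [
--         "sales rep", "sales team", "account executive", "sales leader",
--         "salesblazer", "sales manager", "quota", "pipeline", "revenue",
--     ],
--     "marketing_leader": [
--         "marketer", "marketing team", "marketing leader", "cmo",
--         "marketing manager", "campaign", "demand gen",
--     ],
--     "service_leader": [
--         "service team", "support team", "serviceblazer", "contact center",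
--         "customer service", "service leader", "service agent",
--     ],
--     "it_leader": [
--         "it team", "it leader", "cio", "admin", "administrator",
--         "security", "platform", "it service", "itsm", "sysadmin",
--     ],
--     "developer": [
--         "developer", "dev ", "code", "coding", "build", "deploy",
--         "api", "sandbox", "vibe cod", "lwc", "apex",
--     ],
--     "business_leader": [
--         "ceo", "executive", "leader", "company", "business", "enterprise",
--         "organization", "strategy", "growth", "roi", "efficiency",
--     ],
-- }
--
-- def detect_persona(text: str, title: str, products: list[str]) -> tuple[str, str | None]:
--     combined = (title + " " + text[:2000]).lower()
--     scores = {p: 0 for p in PERSONA_KEYWORDS}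
--     for persona, keywords in PERSONA_KEYWORDS.items():
--         for kw in keywords:
--             if kw in combined:
--                 scores[persona] += 1
--
--     # Product-based persona hints
--     if "service_cloud" in products:
--         scores["service_leader"] += 2
--     if "marketing_cloud" in products:
--         scores["marketing_leader"] += 2
--     if "platform" in products or "developer" in products:
--         scores["developer"] += 2
--     if "starter" in products:
--         scores["small_business_owner"] += 2
--
--     ranked = sorted(scores.items(), key=lambda x: x[1], reverse=True)
--     primary = ranked[0][0] if ranked[0][1] > 0 else "business_leader"
--     secondary = ranked[1][0] if len(ranked) > 1 and ranked[1][1] > 0 and ranked[1][0] != primary else None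
--     return primary, secondary
-- ===== SOURCE B (Python) =====
-- PERSONA_KEYWORDS = {
--     "small_business_owner": [
--         "small business", "startup", "smb", "sme", "entrepreneur", "founder",
--         "growing business", "small team",
--     ],
--     "sales_leader": [
--         "sales rep", "sales team", "account executive", "sales leader",
--         "salesblazer", "sales manager", "quota", "pipeline", "revenue",
--     ],
--     "marketing_leader": [
--         "marketer", "marketing team", "marketing leader", "cmo",
--         "marketing manager", "campaign", "demand gen",
--     ],
--     "service_leader": [
--         "service team", "support team", "serviceblazer", "contact center",
--         "customer service", "service leader", "service agent",
--     ],
--     "it_leader": [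
--         "it team", "it leader", "cio", "admin", "administrator",
--         "security", "platform", "it service", "itsm", "sysadmin",
--     ],
--     "developer": [
--         "developer", "dev ", "code", "coding", "build", "deploy",
--         "api", "sandbox", "vibe cod", "lwc", "apex",
--     ],
--     "business_leader": [
--         "ceo", "executive", "leader", "company", "business", "enterprise",
--         "organization", "strategy", "growth", "roi", "efficiency",
--     ],
-- }
--
-- def detect_persona(text, title, products):
--     combined = (title + " " + text[:2000]).lower()
--     bonus = {
--         "service_leader": 2 if "service_cloud" in products else 0,
--         "marketing_leader": 2 if "marketing_cloud" in products else 0,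
--         "developer": 2 if ("platform" in products or "developer" in products) else 0,
--         "small_business_owner": 2 if "starter" in products else 0,
--     }
--     # Single pass: keep the best and second-best (persona, score) seen so far.
--     # Strict '>' keeps the earliest persona on ties, like a stable reverse sort.
--     best = None
--     second = None
--     for persona, keywords in PERSONA_KEYWORDS.items():
--         score = sum(1 for kw in keywords if kw in combined) + bonus.get(persona, 0)
--         if best is None or score > best[1]:
--             best, second = (persona, score), best
--         elif second is None or score > second[1]:
--             second = (persona, score)
--     primary = best[0] if best[1] > 0 else "business_leader"
--     secondary = second[0] if second is not None and second[1] > 0 and second[0] != primary else None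
--     return primary, secondary
-- ===== Notes on version B (the rewrite author's own statement) =====
-- stated objective: alternative
-- what changed: B drops the scores dict and the sorted() call: it makes one pass over PERSONA_KEYWORDS, computing each persona's score on the fly and maintaining (best, second) pairs with strict '>' updates, which reproduces the first two entries of A's stable reverse sort.
import Mathlib
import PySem

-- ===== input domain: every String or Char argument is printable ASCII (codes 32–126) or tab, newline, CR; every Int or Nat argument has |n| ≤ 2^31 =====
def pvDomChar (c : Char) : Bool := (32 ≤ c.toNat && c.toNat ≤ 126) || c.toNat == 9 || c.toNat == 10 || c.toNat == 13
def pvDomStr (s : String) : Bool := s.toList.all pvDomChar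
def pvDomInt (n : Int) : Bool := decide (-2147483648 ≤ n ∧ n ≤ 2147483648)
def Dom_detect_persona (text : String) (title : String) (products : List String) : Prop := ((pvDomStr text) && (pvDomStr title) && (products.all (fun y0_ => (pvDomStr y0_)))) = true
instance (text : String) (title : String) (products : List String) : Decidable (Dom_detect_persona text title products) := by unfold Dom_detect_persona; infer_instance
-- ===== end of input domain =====

-- B replaces A's sort of the scores by a single best/second pass over the personas; return values proved equal.

-- ===== PORT A =====
-- the module constant PERSONA_KEYWORDS (shared data; both ports iterate it)
def pvPKW : PySem.Dict String (List String) := PySem.Dict.mk [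
  ("small_business_owner", ["small business", "startup", "smb", "sme", "entrepreneur", "founder", "growing business", "small team"]),
  ("sales_leader", ["sales rep", "sales team", "account executive", "sales leader", "salesblazer", "sales manager", "quota", "pipeline", "revenue"]),
  ("marketing_leader", ["marketer", "marketing team", "marketing leader", "cmo", "marketing manager", "campaign", "demand gen"]),
  ("service_leader", ["service team", "support team", "serviceblazer", "contact center", "customer service", "service leader", "service agent"]),
  ("it_leader", ["it team", "it leader", "cio", "admin", "administrator", "security", "platform", "it service", "itsm", "sysadmin"]),
  ("developer", ["developer", "dev ", "code", "coding", "build", "deploy", "api", "sandbox", "vibe cod", "lwc", "apex"]),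
  ("business_leader", ["ceo", "executive", "leader", "company", "business", "enterprise", "organization", "strategy", "growth", "roi", "efficiency"])]

def detect_persona (text : String) (title : String) (products : List String) : String × Option String :=
  let combined := PySem.Str.lower (title ++ " " ++ PySem.Str.slice text none (some 2000))
  let scores0 : PySem.Dict String Int := pvPKW.keys.foldl (fun d p => d.insert p 0) (PySem.Dict.mk [])
  -- scores[persona] += 1: the key is always present (scores was initialised over all personas), so modify is exact
  let scores1 := pvPKW.items.foldl (fun d pk => pk.2.foldl (fun d kw => if PySem.Str.isIn kw combined then d.modify pk.1 0 (· + 1) else d) d) scores0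
  let scores2 := if products.contains "service_cloud" then scores1.modify "service_leader" 0 (· + 2) else scores1
  let scores3 := if products.contains "marketing_cloud" then scores2.modify "marketing_leader" 0 (· + 2) else scores2
  let scores4 := if products.contains "platform" || products.contains "developer" then scores3.modify "developer" 0 (· + 2) else scores3
  let scores5 := if products.contains "starter" then scores4.modify "small_business_owner" 0 (· + 2) else scores4
  let ranked := PySem.List.sorted scores5.items (fun x => x.2) true
  -- ranked[0] / ranked[1]: ranked always holds the 7 personas, so the defaults below are never used
  let r0 := PySem.List.pyGetD ranked 0 ("", 0)
  let primary := if r0.2 > 0 then r0.1 else "business_leader"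
  let r1 := PySem.List.pyGetD ranked 1 ("", 0)
  let secondary := if 1 < ranked.length ∧ r1.2 > 0 ∧ r1.1 ≠ primary then some r1.1 else none
  (primary, secondary)

-- ===== PORT B =====
-- one step of B's loop: state = none | some (best, none | some second)
def pvStep (s : Option ((String × Int) × Option (String × Int))) (x : String × Int) :
    Option ((String × Int) × Option (String × Int)) :=
  match s with
  | none => some (x, none)
  | some (b, so) =>
    if x.2 > b.2 then some (x, some b)
    else
      match so with
      | none => some (b, some x)
      | some sc => if x.2 > sc.2 then some (b, some x) else some (b, some sc)

def detect_persona_alt (text : String) (title : String) (products : List String) : String × Option String :=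
  let combined := PySem.Str.lower (title ++ " " ++ PySem.Str.slice text none (some 2000))
  let bonus : PySem.Dict String Int := PySem.Dict.mk [
    ("service_leader", if products.contains "service_cloud" then 2 else 0),
    ("marketing_leader", if products.contains "marketing_cloud" then 2 else 0),
    ("developer", if products.contains "platform" || products.contains "developer" then 2 else 0),
    ("small_business_owner", if products.contains "starter" then 2 else 0)]
  let st := pvPKW.items.foldl (fun s pk =>
    pvStep s (pk.1, (pk.2.countP (fun kw => PySem.Str.isIn kw combined) : Int) + bonus.getD pk.1 0)) none
  match st with
  | none => ("business_leader", none)  -- unreachable: pvPKW is non-empty, so the loop always sets best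
  | some (b, so) =>
    let primary := if b.2 > 0 then b.1 else "business_leader"
    let secondary := match so with
      | none => none
      | some sc => if sc.2 > 0 ∧ sc.1 ≠ primary then some sc.1 else none
    (primary, secondary)

-- ===== PRECONDITION & SPEC =====
def Spec_detect_persona (text : String) (title : String) (products : List String) (out : String × Option String) : Prop := out = detect_persona_alt text title products
instance (text : String) (title : String) (products : List String) (out : String × Option String) : Decidable (Spec_detect_persona text title products out) := by unfold Spec_detect_persona; infer_instance

-- ===== CLAIM (what is proved, stated in full; the proofs are below) =====
def Claim_equal_detect_persona : Prop := ∀ (text : String) (title : String) (products : List String), Dom_detect_persona text title products → Spec_detect_persona text title products (detect_persona text title products)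

-- ===== LEMMAS AND PROOFS =====

-- proof-side stage names (defeq to the let-chain in the ports)
def pvScores0 : PySem.Dict String Int := pvPKW.keys.foldl (fun d p => d.insert p 0) (PySem.Dict.mk [])
def pvScores1 (c : String) : PySem.Dict String Int :=
  pvPKW.items.foldl (fun d pk => pk.2.foldl (fun d kw => if PySem.Str.isIn kw c then d.modify pk.1 0 (· + 1) else d) d) pvScores0
def pvScores5 (c : String) (products : List String) : PySem.Dict String Int :=
  let scores2 := if products.contains "service_cloud" then (pvScores1 c).modify "service_leader" 0 (· + 2) else pvScores1 c
  let scores3 := if products.contains "marketing_cloud" then scores2.modify "marketing_leader" 0 (· + 2) else scores2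
  let scores4 := if products.contains "platform" || products.contains "developer" then scores3.modify "developer" 0 (· + 2) else scores3
  if products.contains "starter" then scores4.modify "small_business_owner" 0 (· + 2) else scores4

def pvK7 : List String := ["small_business_owner", "sales_leader", "marketing_leader", "service_leader", "it_leader", "developer", "business_leader"]

def pvCnt (kws : List String) (c : String) : Int := (kws.countP (fun kw => PySem.Str.isIn kw c) : Int)

def pvLit (c : String) (products : List String) : List (String × Int) :=
  [("small_business_owner", pvCnt ["small business", "startup", "smb", "sme", "entrepreneur", "founder", "growing business", "small team"] c + (if products.contains "starter" then 2 else 0)),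
   ("sales_leader", pvCnt ["sales rep", "sales team", "account executive", "sales leader", "salesblazer", "sales manager", "quota", "pipeline", "revenue"] c + 0),
   ("marketing_leader", pvCnt ["marketer", "marketing team", "marketing leader", "cmo", "marketing manager", "campaign", "demand gen"] c + (if products.contains "marketing_cloud" then 2 else 0)),
   ("service_leader", pvCnt ["service team", "support team", "serviceblazer", "contact center", "customer service", "service leader", "service agent"] c + (if products.contains "service_cloud" then 2 else 0)),
   ("it_leader", pvCnt ["it team", "it leader", "cio", "admin", "administrator", "security", "platform", "it service", "itsm", "sysadmin"] c + 0),
   ("developer", pvCnt ["developer", "dev ", "code", "coding", "build", "deploy", "api", "sandbox", "vibe cod", "lwc", "apex"] c + (if products.contains "platform" || products.contains "developer" then 2 else 0)),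
   ("business_leader", pvCnt ["ceo", "executive", "leader", "company", "business", "enterprise", "organization", "strategy", "growth", "roi", "efficiency"] c + 0)]

-- ==== lemmas from s5 (assumed proven) ====
lemma pv_set_update_of_mem {α : Type} [BEq α] (l : List α) (s : PySem.Set α)
    (h : ∀ x ∈ l, s.contains x = true) : PySem.Set.update s l = s := by
  induction l with
  | nil => rfl
  | cons x t ih =>
    have hx : PySem.Set.add s x = s := by
      have := h x (by simp)
      simp only [PySem.Set.contains] at this
      simp [PySem.Set.add, PySem.Set.contains, this]
    simp only [PySem.Set.update, List.foldl_cons, hx]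
    exact ih (fun y hy => h y (by simp [hy]))

lemma pv_getD_kwfold (kws : List String) (q : String → Bool) (k v : String)
    (d : PySem.Dict String Int) :
    (kws.foldl (fun d kw => if q kw then d.modify k 0 (· + 1) else d) d).getD v 0
    = d.getD v 0 + if v = k then (kws.countP q : Int) else 0 := by
  rw [PySem.List.foldl_if_eq_foldl_filter q (fun d _ => PySem.Dict.modify d k 0 (· + 1))]
  have h2 : List.foldl (fun d (_ : String) => PySem.Dict.modify d k 0 (· + 1)) d (kws.filter q)
      = List.foldl (fun d x => PySem.Dict.modify d x 0 (· + 1)) d ((kws.filter q).map (fun _ => k)) := by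
    rw [List.foldl_map]
  rw [h2, PySem.Dict.getD_foldl_modify_add_one]
  have h3 : (kws.filter q).map (fun _ => k) = List.replicate (kws.filter q).length k := by
    simp [List.map_const (l := kws.filter q) (b := k)]
  rw [h3, List.count_replicate, List.countP_eq_length_filter]
  by_cases hv : v = k
  · simp [hv]
  · have : ¬ k = v := fun h' => hv h'.symm
    simp [hv, this]

lemma pv_keys_kwfold' (kws : List String) (q : String → Bool) (k : String)
    (d : PySem.Dict String Int) (h : d.contains k = true) :
    (kws.foldl (fun d kw => if q kw then d.modify k 0 (· + 1) else d) d).keys = d.keys := by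
  rw [PySem.List.foldl_if_eq_foldl_filter q (fun d _ => PySem.Dict.modify d k 0 (· + 1))]
  have h2 : List.foldl (fun d (_ : String) => PySem.Dict.modify d k 0 (· + 1)) d (kws.filter q)
      = List.foldl (fun d x => PySem.Dict.modify d x 0 (· + 1)) d ((kws.filter q).map (fun _ => k)) := by
    rw [List.foldl_map]
  rw [h2, PySem.Dict.keys_foldl_modify _ 0 (fun _ _ => (· + 1))]
  apply pv_set_update_of_mem
  intro x hx
  simp only [List.mem_map] at hx
  obtain ⟨y, hy, rfl⟩ := hx
  rw [PySem.Dict.contains_eq_decide_mem_keys] at h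
  simp only [PySem.Set.contains, List.contains_iff_mem]
  exact of_decide_eq_true h

lemma pv_keys_outer (items : List (String × List String)) (q : String → Bool)
    (d : PySem.Dict String Int) (h : ∀ pk ∈ items, d.contains pk.1 = true) :
    (items.foldl (fun d pk => pk.2.foldl (fun d kw => if q kw then d.modify pk.1 0 (· + 1) else d) d) d).keys
    = d.keys := by
  induction items generalizing d with
  | nil => rfl
  | cons pk t ih =>
    simp only [List.foldl_cons]
    have hk := pv_keys_kwfold' pk.2 q pk.1 d (h pk (by simp))
    rw [ih _ ?_, hk]
    intro pj hj
    rw [PySem.Dict.contains_eq_decide_mem_keys, hk, ← PySem.Dict.contains_eq_decide_mem_keys]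
    exact h pj (by simp [hj])

lemma pv_getD_outer (items : List (String × List String)) (q : String → Bool)
    (d : PySem.Dict String Int) (v : String) :
    (items.foldl (fun d pk => pk.2.foldl (fun d kw => if q kw then d.modify pk.1 0 (· + 1) else d) d) d).getD v 0
    = d.getD v 0 + (items.map (fun pk => if v = pk.1 then (pk.2.countP q : Int) else 0)).sum := by
  induction items generalizing d with
  | nil => simp
  | cons pk t ih =>
    simp only [List.foldl_cons, List.map_cons, List.sum_cons, ih, pv_getD_kwfold]
    ring

-- ==== stage characterizations ====
lemma pv_keys1 (c : String) : (pvScores1 c).keys = pvK7 := by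
  unfold pvScores1
  rw [pv_keys_outer]
  · decide
  · decide

lemma pv_getD1 (c : String) (v : String) :
    (pvScores1 c).getD v 0 = pvScores0.getD v 0
      + (pvPKW.items.map (fun pk => if v = pk.1 then (pk.2.countP (fun kw => PySem.Str.isIn kw c) : Int) else 0)).sum := by
  exact pv_getD_outer _ _ _ _

lemma pv_modify_keys_of_contains (d : PySem.Dict String Int) (k : String) (f : Int → Int)
    (h : d.contains k = true) : (d.modify k 0 f).keys = d.keys := by
  rw [PySem.Dict.keys_modify]
  exact PySem.Dict.keys_insert_of_contains d _ h

lemma pv_keys_bonus (d : PySem.Dict String Int) (b : Bool) (k : String)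
    (h : d.keys = pvK7) (hk : k ∈ pvK7) :
    (if b then d.modify k 0 (· + 2) else d).keys = pvK7 := by
  cases b
  · simp only [Bool.false_eq_true, if_false]; exact h
  · simp only [if_pos]
    rw [pv_modify_keys_of_contains, h]
    rw [PySem.Dict.contains_eq_decide_mem_keys, h]
    exact decide_eq_true hk

lemma pv_keys5 (c : String) (products : List String) : (pvScores5 c products).keys = pvK7 := by
  unfold pvScores5
  apply pv_keys_bonus _ _ _ ?_ (by decide)
  apply pv_keys_bonus _ _ _ ?_ (by decide)
  apply pv_keys_bonus _ _ _ ?_ (by decide)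
  apply pv_keys_bonus _ _ _ ?_ (by decide)
  exact pv_keys1 c

lemma pv_getD_ite (b : Bool) (d1 d2 : PySem.Dict String Int) (v : String) :
    (if b then d1 else d2).getD v 0 = if b then d1.getD v 0 else d2.getD v 0 := by
  cases b <;> simp

lemma pv_nodup5 (c : String) (products : List String) : (pvScores5 c products).keys.Nodup := by
  rw [pv_keys5]; decide

lemma pv_items5 (c : String) (products : List String) : (pvScores5 c products).items = pvLit c products := by
  rw [PySem.Dict.items_eq_map_keys _ (pv_nodup5 c products) 0, pv_keys5]
  have hpk : pvPKW.items = [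
    ("small_business_owner", ["small business", "startup", "smb", "sme", "entrepreneur", "founder", "growing business", "small team"]),
    ("sales_leader", ["sales rep", "sales team", "account executive", "sales leader", "salesblazer", "sales manager", "quota", "pipeline", "revenue"]),
    ("marketing_leader", ["marketer", "marketing team", "marketing leader", "cmo", "marketing manager", "campaign", "demand gen"]),
    ("service_leader", ["service team", "support team", "serviceblazer", "contact center", "customer service", "service leader", "service agent"]),
    ("it_leader", ["it team", "it leader", "cio", "admin", "administrator", "security", "platform", "it service", "itsm", "sysadmin"]),
    ("developer", ["developer", "dev ", "code", "coding", "build", "deploy", "api", "sandbox", "vibe cod", "lwc", "apex"]),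
    ("business_leader", ["ceo", "executive", "leader", "company", "business", "enterprise", "organization", "strategy", "growth", "roi", "efficiency"])] := rfl
  have h01 : pvScores0.getD "small_business_owner" 0 = 0 := by decide
  have h02 : pvScores0.getD "sales_leader" 0 = 0 := by decide
  have h03 : pvScores0.getD "marketing_leader" 0 = 0 := by decide
  have h04 : pvScores0.getD "service_leader" 0 = 0 := by decide
  have h05 : pvScores0.getD "it_leader" 0 = 0 := by decide
  have h06 : pvScores0.getD "developer" 0 = 0 := by decide
  have h07 : pvScores0.getD "business_leader" 0 = 0 := by decide
  simp only [pvScores5, pvK7, List.map_cons, List.map_nil, pvLit, pvCnt,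
    pv_getD_ite, PySem.Dict.getD_modify, pv_getD1, hpk,
    List.sum_cons, List.sum_nil, h01, h02, h03, h04, h05, h06, h07]
  simp only [String.reduceEq, if_true, if_false, zero_add, add_zero,
    List.cons.injEq, Prod.mk.injEq, and_true, true_and]
  split_ifs <;> norm_num

def pvF : List (String × Int) → Option ((String × Int) × Option (String × Int))
  | [] => none
  | [a] => some (a, none)
  | a :: b :: _ => some (a, some b)

lemma pvF_insertBy (x : String × Int) (acc : List (String × Int)) :
    pvF (PySem.List.insertBy (fun a b => decide (b.2 < a.2)) x acc) = pvStep (pvF acc) x := by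
  match acc with
  | [] => rfl
  | [a] =>
    simp only [PySem.List.insertBy, pvF, pvStep]
    split_ifs <;> simp_all
  | a :: b :: t =>
    simp only [PySem.List.insertBy, pvF, pvStep]
    split_ifs <;> simp_all

lemma pvF_foldl_insertBy (l acc : List (String × Int)) :
    pvF (l.foldl (fun acc x => PySem.List.insertBy (fun a b => decide (b.2 < a.2)) x acc) acc)
    = l.foldl pvStep (pvF acc) := by
  induction l generalizing acc with
  | nil => rfl
  | cons x t ih => simp only [List.foldl_cons, ih, pvF_insertBy]

lemma pvF_sorted (l : List (String × Int)) :
    pvF (PySem.List.sorted l (fun x => x.2) true) = l.foldl pvStep none := by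
  rw [PySem.List.sorted_rev_eq_foldl_insertBy]
  exact pvF_foldl_insertBy l []

-- B's fold over pvPKW.items equals the fold of pvStep over pvLit (all keys/bonuses literal)
lemma pv_foldB (c : String) (products : List String) :
    pvPKW.items.foldl (fun s pk =>
      pvStep s (pk.1, (pk.2.countP (fun kw => PySem.Str.isIn kw c) : Int) +
        (PySem.Dict.mk [
          ("service_leader", if products.contains "service_cloud" then 2 else 0),
          ("marketing_leader", if products.contains "marketing_cloud" then 2 else 0),
          ("developer", if products.contains "platform" || products.contains "developer" then 2 else 0),
          ("small_business_owner", if products.contains "starter" then 2 else 0)]).getD pk.1 0)) none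
    = (pvLit c products).foldl pvStep none := by
  rfl

-- main
lemma pv_main (c : String) (products : List String) :
    (let ranked := PySem.List.sorted (pvScores5 c products).items (fun x => x.2) true
     let r0 := PySem.List.pyGetD ranked 0 ("", 0)
     let primary := if r0.2 > 0 then r0.1 else "business_leader"
     let r1 := PySem.List.pyGetD ranked 1 ("", 0)
     let secondary := if 1 < ranked.length ∧ r1.2 > 0 ∧ r1.1 ≠ primary then some r1.1 else none
     (primary, secondary))
    = (match (pvLit c products).foldl pvStep none with
       | none => ("business_leader", none)
       | some (b, so) =>
         let primary := if b.2 > 0 then b.1 else "business_leader"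
         let secondary := match so with
           | none => none
           | some sc => if sc.2 > 0 ∧ sc.1 ≠ primary then some sc.1 else none
         (primary, secondary)) := by
  have hlit : (pvScores5 c products).items = pvLit c products := pv_items5 c products
  have hF := pvF_sorted (pvLit c products)
  have hlen : (PySem.List.sorted (pvLit c products) (fun x => x.2) true).length = 7 := by
    rw [PySem.List.length_sorted]; rfl
  rcases hr : PySem.List.sorted (pvLit c products) (fun x => x.2) true with _ | ⟨r0, _ | ⟨r1, t⟩⟩
  · rw [hr] at hlen; simp at hlen
  · rw [hr] at hlen; simp at hlen
  · rw [hr] at hF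
    simp only [pvF] at hF
    simp only [hlit, hr, ← hF]
    have h0 : (0:Int) ≤ (t.length:Int) + 1 := by positivity
    simp [PySem.List.pyGetD, PySem.List.pyGet?, PySem.List.pyIdx?, h0]

-- ===== VERDICT (by name: the statement is the Claim_ definition above) =====
theorem detect_persona_spec : Claim_equal_detect_persona := by
  intro text title products _
  show detect_persona text title products = detect_persona_alt text title products
  have h := pv_main (PySem.Str.lower (title ++ " " ++ PySem.Str.slice text none (some 2000))) products
  rw [← pv_foldB] at h
  exact h
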